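-- pv_equiv track=rewrite | github.com/deviation-365/algorithm-study | 2020-10-04 ~ 2020-10-11/2우혁.py | solution
-- ===== SOURCE A (Python) =====
-- def solution(s):
--     '''
--         단어 단위로 구분하여 홀수는 대문자, 짝수는 소문자로 변환한다.
--         '각 단어는 하나 이상의 공백문자로 구분되어 있습니다.' 라는 문구를 주의하자.
--         만약 'a  bc'인 경우 'A Bc'가 아닌 'A  Bc'로 반환하여야한다.
--     '''
--     # 리스트가 아닌 문자열로 선언하여 불필요한 형변환 과정을 생략한다.
--     result = ''
--     # 띄어쓰기를 기준으로 split하여 반복문을 진행한다.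
--     for word in s.split(" "):
--         for i in range(len(word)):
--             # 기준에 따라 대, 소문자로 변환한다.
--             if i % 2 == 0: result += word[i].upper()
--             else: result += word[i].lower()
--         # split으로 인해 사라진 공백을 마지막으로 추가한다.
--         result += ' '
--     return result[:-1]
--
--     # 위의 코드를 리스트 컴프리헨션을 이용하여 단축한 코드는 아래와 같다.
--     result = ''
--     for i in s.split(" "):
--         result += (''.join([i % 2 == 0 and v.upper() or v.lower() for i, v in enumerate(list(i))])) + " "
--     return result[:-1]
-- ===== SOURCE B (Python) =====
-- def solution(s):
--     out = []
--     k = 0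
--     for c in s:
--         if c == ' ':
--             out.append(c)
--             k = 0
--         else:
--             out.append(c.upper() if k % 2 == 0 else c.lower())
--             k += 1
--     return ''.join(out)
-- ===== Notes on version B (the rewrite author's own statement) =====
-- stated objective: simpler
-- what changed: Replaces split-on-space, per-word indexed loops, trailing-space appends and final [:-1] trim by one pass over the characters with a parity counter that resets at each space, joining at the end.
import Mathlib
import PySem

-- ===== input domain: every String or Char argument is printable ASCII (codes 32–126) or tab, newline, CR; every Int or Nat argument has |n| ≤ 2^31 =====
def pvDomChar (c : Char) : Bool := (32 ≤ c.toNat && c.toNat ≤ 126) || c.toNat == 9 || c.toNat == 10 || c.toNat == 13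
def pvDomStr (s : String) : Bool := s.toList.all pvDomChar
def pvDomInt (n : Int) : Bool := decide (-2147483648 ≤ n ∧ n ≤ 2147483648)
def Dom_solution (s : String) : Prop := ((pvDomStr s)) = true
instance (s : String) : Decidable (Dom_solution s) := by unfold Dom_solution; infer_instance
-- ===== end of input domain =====

-- B replaces split-on-space + per-word indexed loop + trailing-space trim by one pass with a parity counter reset at spaces (objective: simpler).


-- ===== PORT A =====
-- result accumulates over the words of s.split(" "); each word is scanned by index,
-- upper at even indices, lower at odd; a space is appended after every word; result[:-1].
def solution (s : String) : String :=
  let result : List Char :=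
    (PySem.Chars.splitOn s.toList [' ']).foldl
      (fun result word =>
        ((PySem.List.pyRange 0 (PySem.List.len word) 1).foldl
          (fun result i =>
            if PySem.Int.mod i 2 = 0 then
              result ++ [PySem.Chars.upperChar (PySem.List.pyGetD word i ' ')]
            else
              result ++ [PySem.Chars.lowerChar (PySem.List.pyGetD word i ' ')])
          result) ++ [' '])
      []
  String.ofList (PySem.List.slice result none (some (-1)))

-- ===== PORT B =====
-- single pass: a parity counter k resets at each literal space; ''.join at the end.
def solution_alt (s : String) : String :=
  let p : List Char × Nat :=
    s.toList.foldl
      (fun (p : List Char × Nat) c =>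
        if c = ' ' then (p.1 ++ [c], 0)
        else (p.1 ++ [if p.2 % 2 = 0 then PySem.Chars.upperChar c else PySem.Chars.lowerChar c],
              p.2 + 1))
      ([], 0)
  String.ofList p.1

-- ===== PRECONDITION & SPEC =====
def Spec_solution (s : String) (out : String) : Prop := out = solution_alt s
instance (s : String) (out : String) : Decidable (Spec_solution s out) := by unfold Spec_solution; infer_instance

-- ===== CLAIM (what is proved, stated in full; the proofs are below) =====
def Claim_equal_solution : Prop := ∀ (s : String), Dom_solution s → Spec_solution s (solution s)

-- ===== LEMMAS AND PROOFS =====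

-- the per-character transform both programs apply at in-word position k
def pvF (k : Nat) (c : Char) : Char :=
  if k % 2 = 0 then PySem.Chars.upperChar c else PySem.Chars.lowerChar c

-- A's transform of one word starting at position k
def pvAlt (k : Nat) : List Char → List Char
  | [] => []
  | c :: cs => pvF k c :: pvAlt (k + 1) cs

-- the common output on the remaining characters with counter k
def pvBody (k : Nat) : List Char → List Char
  | [] => []
  | c :: cs => if c = ' ' then ' ' :: pvBody 0 cs else pvF k c :: pvBody (k + 1) cs

-- structural single-space split with the current partial word cur
def pvSplit (cur : List Char) : List Char → List (List Char)
  | [] => [cur]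
  | c :: cs => if c = ' ' then cur :: pvSplit [] cs else pvSplit (cur ++ [c]) cs

theorem pvGo_eq (l : List Char) : ∀ (fuel : Nat) (cur : List Char) (acc : List (List Char)),
    l.length ≤ fuel →
    PySem.Chars.splitOn.go [' '] fuel l cur acc = acc.reverse ++ pvSplit cur.reverse l := by
  induction l with
  | nil =>
    intro fuel cur acc h
    cases fuel <;> simp [PySem.Chars.splitOn.go, pvSplit]
  | cons c rest ih =>
    intro fuel cur acc h
    simp only [List.length_cons] at h
    cases fuel with
    | zero => omega
    | succ f =>
      simp only [PySem.Chars.splitOn.go, pvSplit]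
      by_cases hc : c = ' '
      · subst hc
        have hp : [' '].isPrefixOf (' ' :: rest) = true := by simp [List.isPrefixOf]
        rw [if_pos hp, if_pos rfl]
        simp only [List.length_singleton, List.drop_succ_cons, List.drop_zero]
        rw [ih f [] (cur.reverse :: acc) (by omega)]
        simp
      · have hp : [' '].isPrefixOf (c :: rest) = false := by
          simp [List.isPrefixOf]
          exact fun e => hc e.symm
        rw [if_neg (by simp [hp]), if_neg hc]
        rw [ih f (c :: cur) acc (by omega)]
        simp

theorem pvSplitOn_eq (cs : List Char) : PySem.Chars.splitOn cs [' '] = pvSplit [] cs := by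
  show PySem.Chars.splitOn.go [' '] (cs.length + 1) cs [] [] = _
  rw [pvGo_eq cs (cs.length + 1) [] [] (by omega)]
  simp

theorem pvAlt_concat (xs : List Char) : ∀ (k : Nat) (c : Char),
    pvAlt k (xs ++ [c]) = pvAlt k xs ++ [pvF (k + xs.length) c] := by
  induction xs with
  | nil => intro k c; simp [pvAlt]
  | cons x xs ih =>
    intro k c
    simp only [List.cons_append, pvAlt, ih, List.length_cons]
    ring_nf

theorem pvInner_eq (w : List Char) : ∀ (acc : List Char),
    (PySem.List.pyRange 0 (PySem.List.len w) 1).foldl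
      (fun result i =>
        if PySem.Int.mod i 2 = 0 then
          result ++ [PySem.Chars.upperChar (PySem.List.pyGetD w i ' ')]
        else
          result ++ [PySem.Chars.lowerChar (PySem.List.pyGetD w i ' ')]) acc
    = acc ++ pvAlt 0 w := by
  induction w using List.reverseRecOn with
  | nil => intro acc; simp [PySem.List.pyRange, PySem.List.len, pvAlt]
  | append_singleton w c ih =>
    intro acc
    have hlen : PySem.List.len (w ++ [c]) = (w.length : Int) + 1 := by
      simp [PySem.List.len_eq]
    rw [hlen, PySem.List.pyRange_one_succ_right (by positivity)]
    rw [List.foldl_append]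
    have hmid : (PySem.List.pyRange 0 (w.length : Int) 1).foldl
        (fun result i =>
          if PySem.Int.mod i 2 = 0 then
            result ++ [PySem.Chars.upperChar (PySem.List.pyGetD (w ++ [c]) i ' ')]
          else
            result ++ [PySem.Chars.lowerChar (PySem.List.pyGetD (w ++ [c]) i ' ')]) acc
        = acc ++ pvAlt 0 w := by
      rw [PySem.List.foldl_congr_mem (g := fun result i =>
          if PySem.Int.mod i 2 = 0 then
            result ++ [PySem.Chars.upperChar (PySem.List.pyGetD w i ' ')]
          else
            result ++ [PySem.Chars.lowerChar (PySem.List.pyGetD w i ' ')])]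
      · rw [← PySem.List.len_eq] at *
        exact ih acc
      · intro a i hi
        have hi' := (PySem.List.mem_pyRange_one).1 hi
        have h0 : 0 ≤ i := hi'.1
        have h1 : i < w.length := hi'.2
        have : PySem.List.pyGetD (w ++ [c]) i ' ' = PySem.List.pyGetD w i ' ' := by
          rw [PySem.List.pyGetD_eq_getElem (w ++ [c]) ' ' h0 (by simp; omega),
              PySem.List.pyGetD_eq_getElem w ' ' h0 (by omega)]
          rw [List.getElem_append_left]
        rw [this]
    rw [← PySem.List.len_eq] at hmid
    rw [show PySem.List.pyRange 0 (PySem.List.len w) 1 = PySem.List.pyRange 0 (w.length:Int) 1 by rw [PySem.List.len_eq]] at hmid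
    rw [hmid]
    simp only [List.foldl_cons, List.foldl_nil]
    have hmod : PySem.Int.mod (w.length : Int) 2 = ((w.length % 2 : Nat) : Int) :=
      PySem.Int.mod_natCast w.length 2
    have hget : PySem.List.pyGetD (w ++ [c]) (w.length : Int) ' ' = c := by
      rw [PySem.List.pyGetD_eq_getElem (w ++ [c]) ' ' (by positivity) (by simp)]
      simp
    rw [pvAlt_concat]
    by_cases hp : w.length % 2 = 0
    · rw [if_pos (by rw [hmod, hp]; rfl), hget]
      simp [pvF, hp]
    · rw [if_neg (by rw [hmod]; omega), hget]
      simp [pvF, hp]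

theorem pvSplit_flat (cs : List Char) : ∀ (cur : List Char),
    (pvSplit cur cs).flatMap (fun w => pvAlt 0 w ++ [' '])
    = pvAlt 0 cur ++ pvBody cur.length cs ++ [' '] := by
  induction cs with
  | nil => intro cur; simp [pvSplit, pvBody]
  | cons c cs ih =>
    intro cur
    by_cases hc : c = ' '
    · subst hc
      simp [pvSplit, pvBody, ih, pvAlt]
    · simp only [pvSplit, pvBody, if_neg hc, ih, pvAlt_concat, List.length_append,
        List.length_singleton, Nat.zero_add]
      simp

theorem pvB_fold (cs : List Char) : ∀ (acc : List Char) (k : Nat),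
    (cs.foldl
      (fun (p : List Char × Nat) c =>
        if c = ' ' then (p.1 ++ [c], 0)
        else (p.1 ++ [if p.2 % 2 = 0 then PySem.Chars.upperChar c else PySem.Chars.lowerChar c],
              p.2 + 1))
      (acc, k)).1 = acc ++ pvBody k cs := by
  induction cs with
  | nil => intro acc k; simp [pvBody]
  | cons c cs ih =>
    intro acc k
    by_cases hc : c = ' '
    · subst hc; simp [pvBody, ih]
    · simp [pvBody, if_neg hc, ih, pvF]

theorem solution_spec : Claim_equal_solution := by
  intro s _
  unfold Spec_solution solution solution_alt
  rw [pvSplitOn_eq]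
  have houter : ∀ (r : List Char) (w : List Char),
      ((PySem.List.pyRange 0 (PySem.List.len w) 1).foldl
        (fun result i =>
          if PySem.Int.mod i 2 = 0 then
            result ++ [PySem.Chars.upperChar (PySem.List.pyGetD w i ' ')]
          else
            result ++ [PySem.Chars.lowerChar (PySem.List.pyGetD w i ' ')]) r) ++ [' ']
      = r ++ (pvAlt 0 w ++ [' ']) := by
    intro r w; rw [pvInner_eq]; simp
  simp only [houter]
  rw [PySem.List.foldl_append_eq_flatMap, pvSplit_flat, pvB_fold]
  simp only [pvAlt, List.nil_append, PySem.List.slice_to_neg_one, List.length_nil]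
  rw [List.dropLast_concat]
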